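-- pv_equiv track=rewrite | github.com/tsondo/musicvision | src/musicvision/engine_registry.py | compute_subclip_frames
-- ===== SOURCE A (Python) =====
-- import math
--
-- def compute_subclip_frames(
--     total_frames: int,
--     max_frames: int,
--     min_frames: int,
-- ) -> list[int]:
--     """
--     Divide total_frames into sub-clips respecting engine constraints.
--
--     Returns a list of frame counts. ``sum(result) == total_frames`` always.
--
--     Strategy:
--     - If total fits in one clip, return [total_frames].
--     - Otherwise compute n = ceil(total / max). If the remainder
--       (what the last clip would get) is below min_frames, reduce n by 1
--       and redistribute evenly.
--     - Equal distribution: each clip gets total // n, first (total % n) clips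
--       get one extra frame.
--     """
--     if total_frames <= 0:
--         return []
--
--     if total_frames <= max_frames:
--         return [total_frames]
--
--     n = math.ceil(total_frames / max_frames)
--     remainder = total_frames - (n - 1) * max_frames
--
--     # If the remainder (what the last clip would get in a naive split) is
--     # below min_frames, try using fewer clips.  But only if the reduced
--     # count still keeps every clip within max_frames.
--     if remainder < min_frames and n > 1:
--         candidate = n - 1
--         if candidate > 0 and math.ceil(total_frames / candidate) <= max_frames:
--             n = candidate
--
--     # Equal distribution across n clips
--     base = total_frames // n
--     extra = total_frames % n
--
--     # First 'extra' clips get base+1 frames, rest get base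
--     counts = [base + 1] * extra + [base] * (n - extra)
--
--     assert sum(counts) == total_frames, f"Frame count mismatch: {sum(counts)} != {total_frames}"
--     assert all(c >= min_frames for c in counts), f"Sub-clip below minimum: {min(counts)} < {min_frames}"
--     assert all(c <= max_frames for c in counts), f"Sub-clip above maximum: {max(counts)} > {max_frames}"
--
--     return counts
-- ===== SOURCE B (Python) =====
-- import math
--
-- def compute_subclip_frames(
--     total_frames: int,
--     max_frames: int,
--     min_frames: int,
-- ) -> list[int]:
--     """Divide total_frames into clips: pick the clip count as A does, then
--     fill the list greedily, each clip taking ceil(remaining / clips_left)."""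
--     if total_frames <= 0:
--         return []
--     if total_frames <= max_frames:
--         return [total_frames]
--
--     n = math.ceil(total_frames / max_frames)
--     # reduce the clip count by one when the naive last clip would be too short
--     # and the reduced count still keeps every clip within max_frames
--     if (total_frames - (n - 1) * max_frames < min_frames
--             and n > 1
--             and math.ceil(total_frames / (n - 1)) <= max_frames):
--         n -= 1
--
--     counts = []
--     remaining = total_frames
--     for clips_left in range(n, 0, -1):
--         c = math.ceil(remaining / clips_left)
--         counts.append(c)
--         remaining -= c
--     return counts
-- ===== Notes on version B (the rewrite author's own statement) =====
-- stated objective: alternative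
-- what changed: A distributes frames with a closed-form base/extra split (total//n and total%n into two replicated blocks); B instead builds the list with a greedy loop that maintains remaining and clips_left, giving each clip ceil(remaining/clips_left).
import Mathlib
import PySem

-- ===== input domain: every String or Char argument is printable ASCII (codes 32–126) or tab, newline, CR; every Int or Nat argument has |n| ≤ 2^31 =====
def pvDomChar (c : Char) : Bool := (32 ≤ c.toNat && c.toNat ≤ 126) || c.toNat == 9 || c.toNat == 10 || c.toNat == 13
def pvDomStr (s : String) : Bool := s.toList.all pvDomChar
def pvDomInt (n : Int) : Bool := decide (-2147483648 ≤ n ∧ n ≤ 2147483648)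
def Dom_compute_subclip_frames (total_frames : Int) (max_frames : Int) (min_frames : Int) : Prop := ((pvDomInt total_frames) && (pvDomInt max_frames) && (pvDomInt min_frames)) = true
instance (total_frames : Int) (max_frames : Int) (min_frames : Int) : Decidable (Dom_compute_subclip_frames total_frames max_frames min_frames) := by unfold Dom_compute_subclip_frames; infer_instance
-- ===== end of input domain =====

-- B replaces A's closed-form base/extra distribution by a greedy loop that gives each
-- clip ceil(remaining / clips_left); same return value everywhere A returns (objective: alternative).

-- math.ceil(a / b): exact integer ceiling division on the stated domain (|a| ≤ 2^31, so
-- the float quotient never rounds across an integer)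
def pvCdiv (a b : Int) : Int := -(PySem.Int.floordiv (-a) b)

-- ===== PORT A =====
-- (A's asserts never fire inside Pre_; inputs where they raise are outside Pre_)
def compute_subclip_frames (total_frames : Int) (max_frames : Int) (min_frames : Int) : List Int :=
  if total_frames ≤ 0 then []
  else if total_frames ≤ max_frames then [total_frames]
  else
    let n := pvCdiv total_frames max_frames
    let remainder := total_frames - (n - 1) * max_frames
    let n' :=
      if remainder < min_frames ∧ n > 1 then
        if n - 1 > 0 ∧ pvCdiv total_frames (n - 1) ≤ max_frames then n - 1 else n
      else n
    let base := PySem.Int.floordiv total_frames n'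
    let extra := PySem.Int.mod total_frames n'
    List.replicate extra.toNat (base + 1) ++ List.replicate (n' - extra).toNat base

-- ===== PORT B =====
-- the loop `for clips_left in range(n, 0, -1)` of Source B, counting clips_left down to 1
def pvDistribute : Nat → Int → List Int → List Int
  | 0, _, counts => counts
  | m + 1, remaining, counts =>
      let c := pvCdiv remaining ((m : Int) + 1)
      pvDistribute m (remaining - c) (counts ++ [c])

def compute_subclip_frames_alt (total_frames : Int) (max_frames : Int) (min_frames : Int) : List Int :=
  if total_frames ≤ 0 then []
  else if total_frames ≤ max_frames then [total_frames]
  else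
    let n := pvCdiv total_frames max_frames
    let n' :=
      if total_frames - (n - 1) * max_frames < min_frames ∧ n > 1 ∧
          pvCdiv total_frames (n - 1) ≤ max_frames then n - 1
      else n
    pvDistribute n'.toNat total_frames []

-- ===== PRECONDITION & SPEC =====
-- the clip count A selects (pure arithmetic, used only to state Pre_)
def pvNsel (total_frames : Int) (max_frames : Int) (min_frames : Int) : Int :=
  let n := pvCdiv total_frames max_frames
  if total_frames - (n - 1) * max_frames < min_frames ∧ n > 1 ∧
      pvCdiv total_frames (n - 1) ≤ max_frames then n - 1
  else n

-- Pre_ excludes exactly the inputs on which A raises: ZeroDivisionError when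
-- total_frames > max_frames and max_frames = 0, and AssertionError when the even split
-- gives some clip fewer than min_frames frames (this also covers max_frames < 0).
def Pre_compute_subclip_frames (total_frames : Int) (max_frames : Int) (min_frames : Int) : Prop :=
  total_frames ≤ 0 ∨ total_frames ≤ max_frames ∨
    (1 ≤ max_frames ∧
      min_frames ≤ PySem.Int.floordiv total_frames (pvNsel total_frames max_frames min_frames))
instance (total_frames : Int) (max_frames : Int) (min_frames : Int) : Decidable (Pre_compute_subclip_frames total_frames max_frames min_frames) := by unfold Pre_compute_subclip_frames; infer_instance

def pvWitness_compute_subclip_frames : Int × Int × Int := (10, 3, 2)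

def Spec_compute_subclip_frames (total_frames : Int) (max_frames : Int) (min_frames : Int) (out : List Int) : Prop := out = compute_subclip_frames_alt total_frames max_frames min_frames
instance (total_frames : Int) (max_frames : Int) (min_frames : Int) (out : List Int) : Decidable (Spec_compute_subclip_frames total_frames max_frames min_frames out) := by unfold Spec_compute_subclip_frames; infer_instance

-- ===== CLAIM (what is proved, stated in full; the proofs are below) =====
def Claim_equal_compute_subclip_frames : Prop := ∀ (total_frames : Int) (max_frames : Int) (min_frames : Int), Dom_compute_subclip_frames total_frames max_frames min_frames → Pre_compute_subclip_frames total_frames max_frames min_frames → Spec_compute_subclip_frames total_frames max_frames min_frames (compute_subclip_frames total_frames max_frames min_frames)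

-- ===== LEMMAS AND PROOFS =====

-- ceiling division characterised through Euclidean div/mod (positive divisor)
lemma pvCdiv_eq (t n : Int) (hn : 0 < n) :
    pvCdiv t n = t / n + (if t % n = 0 then 0 else 1) := by
  unfold pvCdiv
  rw [PySem.Int.neg_floordiv_neg_eq_iff_of_pos hn]
  have h0 := Int.mul_ediv_add_emod t n
  have h1 := Int.emod_nonneg t (by omega : n ≠ 0)
  have h2 := Int.emod_lt_of_pos t hn
  split_ifs with h
  · constructor <;> ring_nf <;> nlinarith [h0, h1, h2, mul_comm (t / n) n]
  · have h1' : 0 < t % n := by omega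
    constructor <;> ring_nf <;> nlinarith [h0, h1', h2, mul_comm (t / n) n]

-- the greedy loop of B produces the closed-form base/extra distribution of A
lemma pvDistribute_eq (m : Nat) : ∀ (t : Int) (acc : List Int),
    pvDistribute (m + 1) t acc =
      acc ++ List.replicate (t % ((m : Int) + 1)).toNat (t / ((m : Int) + 1) + 1)
          ++ List.replicate ((((m : Int) + 1) - t % ((m : Int) + 1)).toNat) (t / ((m : Int) + 1)) := by
  induction m with
  | zero =>
      intro t acc
      simp [pvDistribute, pvCdiv_eq t 1 (by omega)]
  | succ m ih =>
      intro t acc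
      have hstep : pvDistribute (m + 1 + 1) t acc
          = pvDistribute (m + 1) (t - pvCdiv t (((m + 1 : Nat) : Int) + 1))
              (acc ++ [pvCdiv t (((m + 1 : Nat) : Int) + 1)]) := rfl
      rw [hstep, ih]
      push_cast
      have hpos : (0 : Int) < (m : Int) + 1 + 1 := by omega
      have hne : ((m : Int) + 1 + 1) ≠ 0 := by omega
      set N : Int := (m : Int) + 1 + 1 with hN
      have h0 := Int.mul_ediv_add_emod t N
      have h1 := Int.emod_nonneg t hne
      have h2 := Int.emod_lt_of_pos t hpos
      set base : Int := t / N with hbase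
      set extra : Int := t % N with hextra
      have hc : pvCdiv t N = base + (if extra = 0 then 0 else 1) := by
        rw [pvCdiv_eq t N hpos, ← hbase, ← hextra]
      rw [hc]
      by_cases hx : extra = 0
      · -- c = base, t' = (m+1)*base
        simp only [hx, if_pos]
        have ht' : t - (base + 0) = ((m : Int) + 1) * base := by nlinarith
        have hdiv : (t - (base + 0)) / ((m : Int) + 1) = base := by
          rw [ht']; exact Int.mul_ediv_cancel_left base (by omega)
        have hmod : (t - (base + 0)) % ((m : Int) + 1) = 0 := by
          rw [ht']; exact Int.mul_emod_right _ _
        rw [hdiv, hmod]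
        simp only [Int.toNat_zero, List.replicate_zero, List.append_nil]
        have : (N - 0).toNat = (((m : Int) + 1) - 0).toNat + 1 := by omega
        rw [this, List.replicate_succ]
        simp
      · -- c = base + 1, t' = (m+1)*base + (extra - 1)
        simp only [hx, if_false]
        have hx1 : 1 ≤ extra := by omega
        have ht' : t - (base + 1) = (extra - 1) + ((m : Int) + 1) * base := by nlinarith
        have hdm : (t - (base + 1)) / ((m : Int) + 1) = base ∧
                   (t - (base + 1)) % ((m : Int) + 1) = extra - 1 := by
          constructor
          · rw [ht', Int.add_mul_ediv_left _ _ (by omega : ((m : Int) + 1) ≠ 0),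
                Int.ediv_eq_zero_of_lt (by omega) (by omega)]
            omega
          · rw [ht', Int.add_mul_emod_self_left, Int.emod_eq_of_lt (by omega) (by omega)]

        rw [hdm.1, hdm.2]
        have h3 : extra.toNat = (extra - 1).toNat + 1 := by omega
        have h4 : (N - extra).toNat = (((m : Int) + 1) - (extra - 1)).toNat := by omega
        rw [h3, h4, List.replicate_succ]
        simp

-- A's ceiling of total/max bounds total from above
lemma le_mul_pvCdiv (t mx : Int) (hmx : 0 < mx) : t ≤ pvCdiv t mx * mx := by
  unfold pvCdiv
  have h0 := PySem.Int.floordiv_mul_add_mod (-t) mx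
  have h1 := PySem.Int.mod_nonneg (-t) hmx
  nlinarith

-- ===== VERDICT (by name: the statement is the Claim_ definition above) =====
theorem compute_subclip_frames_spec : Claim_equal_compute_subclip_frames := by
  intro t mx mn hDom hPre
  unfold Spec_compute_subclip_frames compute_subclip_frames compute_subclip_frames_alt
  by_cases h0 : t ≤ 0
  · simp [h0]
  by_cases h1 : t ≤ mx
  · simp [h0, h1]
  simp only [h0, h1, if_false]
  have hmx : 1 ≤ mx := by
    rcases hPre with h | h | h
    · omega
    · omega
    · exact h.1
  set n0 : Int := pvCdiv t mx with hn0
  have hn2 : 2 ≤ n0 := by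
    have hle := le_mul_pvCdiv t mx (by omega)
    rw [← hn0] at hle
    nlinarith
  have hgt : n0 > 1 := by omega
  have hpos : n0 - 1 > 0 := by omega
  have hsel : (if t - (n0 - 1) * mx < mn ∧ n0 > 1 then
                if n0 - 1 > 0 ∧ pvCdiv t (n0 - 1) ≤ mx then n0 - 1 else n0
              else n0)
            = (if t - (n0 - 1) * mx < mn ∧ n0 > 1 ∧ pvCdiv t (n0 - 1) ≤ mx then n0 - 1 else n0) := by
    by_cases hP : t - (n0 - 1) * mx < mn <;> by_cases hq : pvCdiv t (n0 - 1) ≤ mx <;>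
      simp [hP, hq, hgt]
  rw [hsel]
  set N : Int := if t - (n0 - 1) * mx < mn ∧ n0 > 1 ∧ pvCdiv t (n0 - 1) ≤ mx then n0 - 1 else n0
    with hNdef
  have hN1 : 1 ≤ N := by rw [hNdef]; split_ifs <;> omega
  obtain ⟨k, hk⟩ : ∃ k, N.toNat = k + 1 := ⟨N.toNat - 1, by omega⟩
  have hkN : ((k : Int) + 1) = N := by omega
  rw [hk, pvDistribute_eq, hkN,
      PySem.Int.floordiv_eq_ediv_of_pos (show (0:Int) < N by omega),
      PySem.Int.mod_eq_emod_of_pos (show (0:Int) < N by omega)]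
  simp
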